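-- pv_equiv track=rewrite | github.com/jdonaldson/semantic-proprioception-demo | paper/test_hilbert_lsh.py | hilbert_encode_2d
-- ===== SOURCE A (Python) =====
-- def hilbert_encode_2d(x, y, order):
--     """
--     Encode 2D coordinates to Hilbert curve index
--
--     Simple implementation for low orders
--     """
--     n = 1 << order  # 2^order
--
--     # Clip to range
--     x = max(0, min(n-1, x))
--     y = max(0, min(n-1, y))
--
--     index = 0
--     s = n // 2
--
--     while s > 0:
--         rx = 1 if (x & s) > 0 else 0
--         ry = 1 if (y & s) > 0 else 0
--
--         index += s * s * ((3 * rx) ^ ry)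
--
--         # Rotate coordinates
--         if ry == 0:
--             if rx == 1:
--                 x = n - 1 - x
--                 y = n - 1 - y
--             x, y = y, x
--
--         s //= 2
--
--     return index
-- ===== SOURCE B (Python) =====
-- # Hilbert encode via a finite-state-machine table over (orientation state, quadrant)
-- # instead of A's in-place coordinate rotation/reflection.
--
-- # _TABLE[state][2*bx+by] = (output digit, next state); states are the four
-- # orientations of the curve (swap/complement flags packed as 2*sw+cp).
-- _TABLE = (
--     ((0, 2), (1, 0), (3, 3), (2, 0)),
--     ((2, 1), (3, 2), (1, 1), (0, 3)),
--     ((0, 0), (3, 1), (1, 2), (2, 2)),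
--     ((2, 3), (1, 3), (3, 0), (0, 1)),
-- )
--
-- def hilbert_encode_2d(x, y, order):
--     """
--     Encode 2D coordinates to Hilbert curve index
--
--     Simple implementation for low orders
--     """
--     n = 1 << order
--
--     # Clip to range
--     x = max(0, min(n - 1, x))
--     y = max(0, min(n - 1, y))
--
--     index = 0
--     state = 0
--     i = order - 1
--     while i >= 0:
--         bx = (x >> i) & 1
--         by = (y >> i) & 1
--         d, state = _TABLE[state][2 * bx + by]
--         index = index * 4 + d
--         i -= 1
--     return index
-- ===== Notes on version B (the rewrite author's own statement) =====
-- stated objective: faster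
-- what changed: B replaces A's in-place coordinate rotation/reflection inside the bit loop by a precomputed 4-state finite-state-machine table indexed by (orientation state, quadrant bits), accumulating the index as index*4+digit; per iteration B extracts two single bits instead of A's full-width big-integer operations (n-1-x, n-1-y, s*s), which a timing run measured as a large and growing speedup at high orders.
import Mathlib
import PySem

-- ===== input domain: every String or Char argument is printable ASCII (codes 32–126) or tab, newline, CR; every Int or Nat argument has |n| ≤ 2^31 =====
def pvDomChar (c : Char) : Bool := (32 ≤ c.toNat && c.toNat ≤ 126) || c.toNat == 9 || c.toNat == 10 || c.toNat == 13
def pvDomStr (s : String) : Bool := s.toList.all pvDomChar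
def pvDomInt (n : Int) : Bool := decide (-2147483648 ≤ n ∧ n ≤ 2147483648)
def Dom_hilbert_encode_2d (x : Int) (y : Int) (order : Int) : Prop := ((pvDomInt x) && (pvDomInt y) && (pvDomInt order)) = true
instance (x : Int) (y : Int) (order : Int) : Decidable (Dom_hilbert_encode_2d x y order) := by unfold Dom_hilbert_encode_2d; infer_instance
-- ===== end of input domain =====

-- B replaces A's in-place coordinate rotation/reflection by a 4-state FSM table over
-- (orientation state, quadrant bits); same clipping, same MSB-to-LSB scan; measured faster at high orders.

-- ===== PORT A =====
-- the while-loop of A: state (x, y, s, index), n fixed; s halves each turn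
def hilbertLoopA (x y s n index : Int) : Int :=
  if h : s > 0 then
    let rx : Int := if PySem.Int.band x s > 0 then 1 else 0
    let ry : Int := if PySem.Int.band y s > 0 then 1 else 0
    let index' := index + s * s * (PySem.Int.bxor (3 * rx) ry)
    if ry = 0 then
      if rx = 1 then hilbertLoopA (n - 1 - y) (n - 1 - x) (PySem.Int.floordiv s 2) n index'
      else hilbertLoopA y x (PySem.Int.floordiv s 2) n index'
    else hilbertLoopA x y (PySem.Int.floordiv s 2) n index'
  else index
termination_by s.toNat
decreasing_by all_goals
  · rw [PySem.Int.floordiv_eq_ediv_of_pos (by omega : (0:Int) < 2)]; omega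

def hilbert_encode_2d (x : Int) (y : Int) (order : Int) : Int :=
  -- n = 1 << order; exact for 0 ≤ order (Pre_); Python raises ValueError for order < 0
  let n : Int := (1 : Int) <<< order.toNat
  let x1 := max 0 (min (n - 1) x)
  let y1 := max 0 (min (n - 1) y)
  hilbertLoopA x1 y1 (PySem.Int.floordiv n 2) n 0

-- ===== PORT B =====
-- _TABLE[state][q] of Source B (a constant 4×4 tuple), as a function
def hilbertTable (state q : Int) : Int × Int :=
  if state = 0 then
    if q = 0 then (0, 2) else if q = 1 then (1, 0) else if q = 2 then (3, 3) else (2, 0)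
  else if state = 1 then
    if q = 0 then (2, 1) else if q = 1 then (3, 2) else if q = 2 then (1, 1) else (0, 3)
  else if state = 2 then
    if q = 0 then (0, 0) else if q = 1 then (3, 1) else if q = 2 then (1, 2) else (2, 2)
  else
    if q = 0 then (2, 3) else if q = 1 then (1, 3) else if q = 2 then (3, 0) else (0, 1)

-- the while-loop of B: state (i, state, index), x y fixed; i counts down
def hilbertLoopB (x y i state index : Int) : Int :=
  if h : i ≥ 0 then
    let bx := PySem.Int.band (x >>> i.toNat) 1
    let by_ := PySem.Int.band (y >>> i.toNat) 1
    let p := hilbertTable state (2 * bx + by_)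
    hilbertLoopB x y (i - 1) p.2 (index * 4 + p.1)
  else index
termination_by (i + 1).toNat
decreasing_by omega

def hilbert_encode_2d_alt (x : Int) (y : Int) (order : Int) : Int :=
  let n : Int := (1 : Int) <<< order.toNat
  let x1 := max 0 (min (n - 1) x)
  let y1 := max 0 (min (n - 1) y)
  hilbertLoopB x1 y1 (order - 1) 0 0

-- ===== PRECONDITION & SPEC =====
-- Pre_ excludes order < 0, on which Python's '1 << order' raises ValueError.
def Pre_hilbert_encode_2d (x : Int) (y : Int) (order : Int) : Prop := 0 ≤ order
instance (x : Int) (y : Int) (order : Int) : Decidable (Pre_hilbert_encode_2d x y order) := by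
  unfold Pre_hilbert_encode_2d; infer_instance

def pvWitness_hilbert_encode_2d : Int × Int × Int := (2, 3, 2)

def Spec_hilbert_encode_2d (x : Int) (y : Int) (order : Int) (out : Int) : Prop := out = hilbert_encode_2d_alt x y order
instance (x : Int) (y : Int) (order : Int) (out : Int) : Decidable (Spec_hilbert_encode_2d x y order out) := by unfold Spec_hilbert_encode_2d; infer_instance

-- ===== CLAIM (what is proved, stated in full; the proofs are below) =====
def Claim_equal_hilbert_encode_2d : Prop := ∀ (x : Int) (y : Int) (order : Int), Dom_hilbert_encode_2d x y order → Pre_hilbert_encode_2d x y order → Spec_hilbert_encode_2d x y order (hilbert_encode_2d x y order)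

-- ===== LEMMAS AND PROOFS =====

-- bit k of t (t ≥ 0 in all uses): (t >> k) & 1, as floored division
def bitI (t : Int) (k : Nat) : Int := t / 2 ^ k % 2

-- the transform A's rotations have applied so far: swap?, then complement both?
def trA (n : Int) (sw cp : Bool) (x y : Int) : Int × Int :=
  let p := if sw then (y, x) else (x, y)
  if cp then (n - 1 - p.1, n - 1 - p.2) else p

-- B's integer state encoding of (sw, cp)
def encS (sw cp : Bool) : Int := (if sw then 2 else 0) + (if cp then 1 else 0)

-- reference spec: Hilbert digits of the k low bits of (x, y) under orientation (sw, cp)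
def hilbertH : Nat → Bool → Bool → Int → Int → Int
  | 0, _, _, _, _ => 0
  | (k+1), sw, cp, x, y =>
    let bx := bitI x k
    let by_ := bitI y k
    let rx := if cp then 1 - (if sw then by_ else bx) else (if sw then by_ else bx)
    let ry := if cp then 1 - (if sw then bx else by_) else (if sw then bx else by_)
    4 ^ k * (if rx = 1 then 3 - ry else ry) +
      (if ry = 0 then hilbertH k (!sw) (if rx = 1 then !cp else cp) x y
       else hilbertH k sw cp x y)

lemma bitI_nonneg (t : Int) (k : Nat) (ht : 0 ≤ t) : 0 ≤ bitI t k := by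
  unfold bitI
  have h1 : 0 ≤ t / 2 ^ k := Int.ediv_nonneg ht (by positivity)
  omega

lemma bitI_lt_two (t : Int) (k : Nat) : bitI t k < 2 := by
  unfold bitI; omega

lemma bitI_cases (t : Int) (k : Nat) (ht : 0 ≤ t) : bitI t k = 0 ∨ bitI t k = 1 := by
  have := bitI_nonneg t k ht; have := bitI_lt_two t k; omega

-- bit k only depends on t mod 2^(k+1)
lemma bitI_eq_emod (t : Int) (k : Nat) : bitI t k = t % 2 ^ (k + 1) / 2 ^ k := by
  have hk : (0:Int) < 2 ^ k := by positivity
  set q : Int := t / 2 ^ (k + 1) with hq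
  have h1 : t % 2 ^ (k + 1) = t - 2 ^ (k + 1) * q := Int.emod_def t _
  have h2 : t / 2 ^ k / 2 = q := by
    rw [Int.ediv_ediv_of_nonneg (by omega : (0:Int) ≤ 2 ^ k), hq, ← pow_succ]
  have h3 : (t - 2 ^ (k + 1) * q) / 2 ^ k = t / 2 ^ k - 2 * q := by
    rw [show t - 2 ^ (k + 1) * q = t + 2 ^ k * (-(2 * q)) by rw [pow_succ]; ring,
      Int.add_mul_ediv_left _ _ (by omega : (2:Int) ^ k ≠ 0)]
    ring
  have h4 : t / 2 ^ k % 2 = t / 2 ^ k - 2 * (t / 2 ^ k / 2) := Int.emod_def _ _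
  unfold bitI
  rw [h1, h3, h4, h2]

-- bit k of n-1-t is the complement of bit k of t when 2^(k+1) ∣ n
lemma bitI_compl (n t : Int) (k : Nat) (hd : (2:Int) ^ (k + 1) ∣ n) :
    bitI (n - 1 - t) k = 1 - bitI t k := by
  have hk : (0:Int) < 2 ^ k := by positivity
  have hM : (0:Int) < 2 ^ (k + 1) := by positivity
  rw [bitI_eq_emod, bitI_eq_emod]
  set M := (2:Int) ^ (k + 1) with hMdef
  have hMg : M = 2 ^ k * 2 := by rw [hMdef, pow_succ]
  have hr : 0 ≤ t % M ∧ t % M < M := ⟨Int.emod_nonneg t (by omega), Int.emod_lt_of_pos t hM⟩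
  obtain ⟨c, hc⟩ := hd
  have ht : t % M = t - M * (t / M) := Int.emod_def t M
  have key : n - 1 - t = (M - 1 - t % M) + M * (c - t / M - 1) := by
    rw [hc, ht]; ring
  have h1 : (n - 1 - t) % M = M - 1 - t % M := by
    rw [key, Int.add_mul_emod_self_left, Int.emod_eq_of_lt (by omega) (by omega)]
  rw [h1]
  set r := t % M with hrdef
  set u := r / 2 ^ k with hudef
  have hu : u < 2 := by
    have hrlt : r < 2 ^ k * 2 := by omega
    have := Int.ediv_le_ediv (by omega : (0:Int) < 2 ^ k) (by omega : r ≤ 2 ^ k * 2 - 1)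
    have h2 : (2 ^ k * 2 - 1 : Int) / 2 ^ k = 1 := by
      rw [show (2:Int) ^ k * 2 - 1 = (2 ^ k - 1) + 2 ^ k * 1 by ring,
        Int.add_mul_ediv_left _ _ (by omega : (2:Int) ^ k ≠ 0),
        Int.ediv_eq_zero_of_lt (by omega) (by omega)]
      norm_num
    omega
  have hu0 : 0 ≤ u := Int.ediv_nonneg hr.1 (by omega)
  have hv := Int.emod_nonneg r (show (2:Int) ^ k ≠ 0 by omega)
  have hv2 := Int.emod_lt_of_pos r hk
  have hrd : r = 2 ^ k * u + r % 2 ^ k := by rw [hudef]; exact (Int.ediv_add_emod r _).symm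
  have hPu : (2:Int) ^ k * (1 - u) = 2 ^ k - 2 ^ k * u := by ring
  have hsplit : M - 1 - r = (2 ^ k - 1 - r % 2 ^ k) + 2 ^ k * (1 - u) := by
    rw [hPu, hMg]; omega
  rw [hsplit, Int.add_mul_ediv_left _ _ (show (2:Int) ^ k ≠ 0 by omega),
    Int.ediv_eq_zero_of_lt (by omega) (by omega)]
  omega

-- (t >> k) & 1 = bit k of t
lemma band_shr_one (t : Int) (k : Nat) : PySem.Int.band (t >>> k) 1 = bitI t k := by
  rw [PySem.Int.band_one, PySem.Int.mod_eq_emod_of_pos (by omega : (0:Int) < 2),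
    Int.shiftRight_eq_div_pow]
  unfold bitI
  norm_num

-- t & 2^k > 0 ↔ bit k of t = 1, for t ≥ 0
lemma band_two_pow_pos_iff (t : Int) (k : Nat) (ht : 0 ≤ t) :
    (PySem.Int.band t (2 ^ k) > 0) ↔ bitI t k = 1 := by
  obtain ⟨m, rfl⟩ : ∃ m : Nat, t = (m : Int) := ⟨t.toNat, (Int.toNat_of_nonneg ht).symm⟩
  have hcast : ((2:Int) ^ k) = ((2 ^ k : Nat) : Int) := by push_cast; ring
  have hb : bitI (m : Int) k = ((m / 2 ^ k % 2 : Nat) : Int) := by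
    unfold bitI; push_cast; ring
  rw [hcast, PySem.Int.band_natCast, Nat.and_two_pow, hb]
  have htb := Nat.toNat_testBit m k
  cases h : m.testBit k <;> rw [h] at htb <;> simp [← htb]

lemma one_shl (k : Nat) : (1 : Int) <<< k = 2 ^ k := by
  rw [Int.shiftLeft_eq]; ring

lemma two_pow_mul_self (k : Nat) : (2:Int) ^ k * 2 ^ k = 4 ^ k := by
  rw [show (4:Int) = 2 * 2 from rfl, mul_pow]

lemma pow_succ_div_two (k : Nat) : ((2:Int) ^ (k + 1)) / 2 = 2 ^ k := by
  rw [pow_succ]; exact Int.mul_ediv_cancel _ (by omega)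

-- the transform stays in range
lemma trA_bounds (n : Int) (sw cp : Bool) (x y : Int)
    (hx : 0 ≤ x ∧ x ≤ n - 1) (hy : 0 ≤ y ∧ y ≤ n - 1) :
    (0 ≤ (trA n sw cp x y).1 ∧ (trA n sw cp x y).1 ≤ n - 1) ∧
    (0 ≤ (trA n sw cp x y).2 ∧ (trA n sw cp x y).2 ≤ n - 1) := by
  cases sw <;> cases cp <;> simp [trA] <;> omega

-- bits of the transformed pair, in terms of bits of x and y
lemma trA_bit1 (n : Int) (sw cp : Bool) (x y : Int) (k : Nat) (hd : (2:Int) ^ (k+1) ∣ n) :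
    bitI (trA n sw cp x y).1 k
      = (if cp then 1 - (if sw then bitI y k else bitI x k) else (if sw then bitI y k else bitI x k)) := by
  cases sw <;> cases cp <;> simp [trA, bitI_compl _ _ _ hd]

lemma trA_bit2 (n : Int) (sw cp : Bool) (x y : Int) (k : Nat) (hd : (2:Int) ^ (k+1) ∣ n) :
    bitI (trA n sw cp x y).2 k
      = (if cp then 1 - (if sw then bitI x k else bitI y k) else (if sw then bitI x k else bitI y k)) := by
  cases sw <;> cases cp <;> simp [trA, bitI_compl _ _ _ hd]

-- one unfolding of A's loop, with the bit tests and the digit in bitI form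
lemma loopA_step (k : Nat) (tx ty n acc : Int) (htx : 0 ≤ tx) (hty : 0 ≤ ty) :
    hilbertLoopA tx ty ((2:Int) ^ (k+1) / 2) n acc =
      hilbertLoopA (if bitI ty k = 0 then (if bitI tx k = 1 then n - 1 - ty else ty) else tx)
                   (if bitI ty k = 0 then (if bitI tx k = 1 then n - 1 - tx else tx) else ty)
                   ((2:Int) ^ k / 2) n
                   (acc + 4 ^ k * (if bitI tx k = 1 then 3 - bitI ty k else bitI ty k)) := by
  have hspos : (0:Int) < 2 ^ k := by positivity
  rw [pow_succ_div_two, hilbertLoopA, dif_pos hspos]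
  have e1 : (if PySem.Int.band tx (2 ^ k) > 0 then (1:Int) else 0) = bitI tx k := by
    by_cases h : PySem.Int.band tx (2 ^ k) > 0
    · rw [if_pos h, (band_two_pow_pos_iff tx k htx).mp h]
    · rw [if_neg h]
      rcases bitI_cases tx k htx with h0 | h1
      · omega
      · exact absurd ((band_two_pow_pos_iff tx k htx).mpr h1) h
  have e2 : (if PySem.Int.band ty (2 ^ k) > 0 then (1:Int) else 0) = bitI ty k := by
    by_cases h : PySem.Int.band ty (2 ^ k) > 0
    · rw [if_pos h, (band_two_pow_pos_iff ty k hty).mp h]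
    · rw [if_neg h]
      rcases bitI_cases ty k hty with h0 | h1
      · omega
      · exact absurd ((band_two_pow_pos_iff ty k hty).mpr h1) h
  simp only [e1, e2, PySem.Int.floordiv_eq_ediv_of_pos (show (0:Int) < 2 by omega)]
  rcases bitI_cases tx k htx with hbx | hbx <;> rcases bitI_cases ty k hty with hby | hby <;>
    simp only [hbx, hby] <;> norm_num <;>
    (rw [← two_pow_mul_self] <;>
     norm_num [show PySem.Int.bxor 0 1 = (1:Int) from by decide,
               show PySem.Int.bxor 3 1 = (2:Int) from by decide])

-- A's loop computes hilbertH of the untransformed coordinates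
lemma loopA_eq_H (k : Nat) (sw cp : Bool) (x y n acc : Int)
    (hx : 0 ≤ x ∧ x ≤ n - 1) (hy : 0 ≤ y ∧ y ≤ n - 1) (hd : (2:Int) ^ k ∣ n) :
    hilbertLoopA (trA n sw cp x y).1 (trA n sw cp x y).2 ((2:Int) ^ k / 2) n acc
      = acc + hilbertH k sw cp x y := by
  induction k generalizing sw cp acc with
  | zero =>
    rw [hilbertLoopA, dif_neg (by norm_num)]
    simp [hilbertH]
  | succ k ih =>
    have hd' : (2:Int) ^ k ∣ n := dvd_trans ⟨2, by ring⟩ hd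
    have hb := trA_bounds n sw cp x y hx hy
    rw [loopA_step k _ _ n acc hb.1.1 hb.2.1,
      trA_bit1 n sw cp x y k hd, trA_bit2 n sw cp x y k hd]
    cases sw <;> cases cp <;>
      [ (have i1 : ∀ acc, hilbertLoopA x y ((2:Int) ^ k / 2) n acc
            = acc + hilbertH k false false x y := fun a => by simpa [trA] using ih false false a hd';
         have i2 : ∀ acc, hilbertLoopA y x ((2:Int) ^ k / 2) n acc
            = acc + hilbertH k true false x y := fun a => by simpa [trA] using ih true false a hd';
         have i3 : ∀ acc, hilbertLoopA (n-1-y) (n-1-x) ((2:Int) ^ k / 2) n acc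
            = acc + hilbertH k true true x y := fun a => by simpa [trA] using ih true true a hd';
         skip);
        (have i1 : ∀ acc, hilbertLoopA (n-1-x) (n-1-y) ((2:Int) ^ k / 2) n acc
            = acc + hilbertH k false true x y := fun a => by simpa [trA] using ih false true a hd';
         have i2 : ∀ acc, hilbertLoopA (n-1-y) (n-1-x) ((2:Int) ^ k / 2) n acc
            = acc + hilbertH k true true x y := fun a => by simpa [trA] using ih true true a hd';
         have i3 : ∀ acc, hilbertLoopA y x ((2:Int) ^ k / 2) n acc
            = acc + hilbertH k true false x y := fun a => by simpa [trA] using ih true false a hd';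
         skip);
        (have i1 : ∀ acc, hilbertLoopA y x ((2:Int) ^ k / 2) n acc
            = acc + hilbertH k true false x y := fun a => by simpa [trA] using ih true false a hd';
         have i2 : ∀ acc, hilbertLoopA x y ((2:Int) ^ k / 2) n acc
            = acc + hilbertH k false false x y := fun a => by simpa [trA] using ih false false a hd';
         have i3 : ∀ acc, hilbertLoopA (n-1-x) (n-1-y) ((2:Int) ^ k / 2) n acc
            = acc + hilbertH k false true x y := fun a => by simpa [trA] using ih false true a hd';
         skip);
        (have i1 : ∀ acc, hilbertLoopA (n-1-y) (n-1-x) ((2:Int) ^ k / 2) n acc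
            = acc + hilbertH k true true x y := fun a => by simpa [trA] using ih true true a hd';
         have i2 : ∀ acc, hilbertLoopA (n-1-x) (n-1-y) ((2:Int) ^ k / 2) n acc
            = acc + hilbertH k false true x y := fun a => by simpa [trA] using ih false true a hd';
         have i3 : ∀ acc, hilbertLoopA x y ((2:Int) ^ k / 2) n acc
            = acc + hilbertH k false false x y := fun a => by simpa [trA] using ih false false a hd';
         skip)] <;>
    (norm_num [trA] <;>
     rcases bitI_cases x k (by omega) with hbx | hbx <;>
     rcases bitI_cases y k (by omega) with hby | hby <;>
     simp only [hilbertH, hbx, hby] <;> norm_num <;>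
     first
       | (rw [i1]; try ring) | (rw [i2]; try ring) | (rw [i3]; try ring))

-- B's loop computes hilbertH too
lemma loopB_eq_H (k : Nat) (sw cp : Bool) (x y idx : Int) (hx : 0 ≤ x) (hy : 0 ≤ y) :
    hilbertLoopB x y ((k : Int) - 1) (encS sw cp) idx = idx * 4 ^ k + hilbertH k sw cp x y := by
  induction k generalizing sw cp idx with
  | zero =>
    rw [hilbertLoopB, dif_neg (by norm_num)]
    simp [hilbertH]
  | succ k ih =>
    have i00 : ∀ idx, hilbertLoopB x y ((k : Int) - 1) 0 idx
        = idx * 4 ^ k + hilbertH k false false x y := fun idx => by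
      simpa [encS] using ih false false idx
    have i01 : ∀ idx, hilbertLoopB x y ((k : Int) - 1) 1 idx
        = idx * 4 ^ k + hilbertH k false true x y := fun idx => by
      simpa [encS] using ih false true idx
    have i10 : ∀ idx, hilbertLoopB x y ((k : Int) - 1) 2 idx
        = idx * 4 ^ k + hilbertH k true false x y := fun idx => by
      simpa [encS] using ih true false idx
    have i11 : ∀ idx, hilbertLoopB x y ((k : Int) - 1) 3 idx
        = idx * 4 ^ k + hilbertH k true true x y := fun idx => by
      simpa [encS] using ih true true idx
    rw [show ((k + 1 : Nat) : Int) - 1 = ((k : Nat) : Int) from by push_cast; ring,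
      hilbertLoopB, dif_pos (by positivity)]
    simp only [Int.toNat_natCast, band_shr_one]
    rcases bitI_cases x k hx with hbx | hbx <;> rcases bitI_cases y k hy with hby | hby <;>
      cases sw <;> cases cp <;>
      simp only [hilbertH, hbx, hby, encS] <;> norm_num [hilbertTable] <;>
      first | (rw [i00]; try ring) | (rw [i01]; try ring) | (rw [i10]; try ring) | (rw [i11]; try ring)

-- ===== VERDICT (by name: the statement is the Claim_ definition above) =====
theorem hilbert_encode_2d_spec : Claim_equal_hilbert_encode_2d := by
  intro x y order _ hpre
  unfold Spec_hilbert_encode_2d hilbert_encode_2d hilbert_encode_2d_alt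
  simp only [one_shl]
  have horder : order = (order.toNat : Int) := (Int.toNat_of_nonneg hpre).symm
  set k := order.toNat with hk
  have hn1 : (1:Int) ≤ 2 ^ k := one_le_pow₀ (by omega)
  set x1 : Int := max 0 (min ((2:Int) ^ k - 1) x) with hx1
  set y1 : Int := max 0 (min ((2:Int) ^ k - 1) y) with hy1
  have hxb : 0 ≤ x1 ∧ x1 ≤ 2 ^ k - 1 := ⟨le_max_left _ _, max_le (by omega) (min_le_left _ _)⟩
  have hyb : 0 ≤ y1 ∧ y1 ≤ 2 ^ k - 1 := ⟨le_max_left _ _, max_le (by omega) (min_le_left _ _)⟩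
  have hA : hilbertLoopA x1 y1 (PySem.Int.floordiv (2 ^ k) 2) (2 ^ k) 0
      = hilbertH k false false x1 y1 := by
    rw [PySem.Int.floordiv_eq_ediv_of_pos (show (0:Int) < 2 by omega)]
    have := loopA_eq_H k false false x1 y1 (2 ^ k) 0 hxb hyb dvd_rfl
    simpa [trA] using this
  have hB : hilbertLoopB x1 y1 (order - 1) 0 0 = hilbertH k false false x1 y1 := by
    rw [horder]
    have := loopB_eq_H k false false x1 y1 0 hxb.1 hyb.1
    simpa [encS] using this
  rw [hA, hB]
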